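-- pv_equiv track=rewrite | github.com/extemporaneousb/Blackdog | src/blackdog/ui.py | _latest_run_summary
-- ===== SOURCE A (Python) =====
-- from typing import Any
--
-- def _title_label(value: Any) -> str:
--     text = str(value or "").strip()
--     if not text:
--         return ""
--     return text.replace("-", " ").replace("_", " ").title()
--
-- def _text_label(value: Any) -> str | None:
--     text = str(value or "").strip()
--     return text or None
--
-- def _latest_task_with_timestamp(
--     tasks: list[dict[str, Any]],
--     fields: tuple[str, ...],
-- ) -> tuple[dict[str, Any] | None, str | None]:
--     latest_task: dict[str, Any] | None = None
--     latest_field: str | None = None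
--     latest_value = ""
--     for task in tasks:
--         for field in fields:
--             value = _text_label(task.get(field))
--             if not value:
--                 continue
--             if value > latest_value:
--                 latest_task = task
--                 latest_field = field
--                 latest_value = value
--             break
--     return latest_task, latest_field
--
-- def _latest_run_summary(tasks: list[dict[str, Any]]) -> str:
--     latest_task, source = _latest_task_with_timestamp(
--         tasks,
--         ("latest_run_at", "latest_result_at", "completed_at", "claimed_at"),
--     )
--     if latest_task is None or source is None:
--         return "No recorded work yet"
--
--     task_id = _text_label(latest_task.get("id")) or "Unknown task"
--     actor = _text_label(latest_task.get("child_agent")) or _text_label(latest_task.get("claimed_by"))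
--     elapsed = _text_label(latest_task.get("run_elapsed_label"))
--     if source == "latest_run_at":
--         parts = [
--             task_id,
--             _title_label(latest_task.get("latest_run_status") or "running"),
--             actor,
--             elapsed,
--         ]
--         return " · ".join(part for part in parts if part)
--     if source == "latest_result_at":
--         parts = [
--             task_id,
--             f"result {_title_label(latest_task.get('latest_result_status') or 'recorded').lower()}",
--             actor,
--         ]
--         return " · ".join(part for part in parts if part)
--     if source == "completed_at":
--         return " · ".join(part for part in (task_id, "completed", actor) if part)
--     return " · ".join(part for part in (task_id, "claimed", actor) if part)
-- ===== SOURCE B (Python) =====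
-- # B: staged passes instead of A's single running-max scan — pass 1 collects each task's
-- # first non-empty timestamp value and takes the plain max of those strings; pass 2 linearly
-- # searches for the first task bearing that peak value; formatting is a dispatch dict of
-- # per-source formatter functions instead of an if-chain.
-- from typing import Any
--
--
-- def _title_label(value: Any) -> str:
--     text = str(value or "").strip()
--     if not text:
--         return ""
--     return text.replace("-", " ").replace("_", " ").title()
--
--
-- def _text_label(value: Any) -> str | None:
--     text = str(value or "").strip()
--     return text or None
--
--
-- _FIELDS = ("latest_run_at", "latest_result_at", "completed_at", "claimed_at")
--
--
-- def _first_hit(task: dict):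
--     for field in _FIELDS:
--         value = _text_label(task.get(field))
--         if value:
--             return field, value
--     return None
--
--
-- def _task_id(task: dict) -> str:
--     return _text_label(task.get("id")) or "Unknown task"
--
--
-- def _actor(task: dict) -> str | None:
--     return _text_label(task.get("child_agent")) or _text_label(task.get("claimed_by"))
--
--
-- def _join(parts) -> str:
--     return " · ".join(part for part in parts if part)
--
--
-- def _fmt_run(task: dict) -> str:
--     return _join([
--         _task_id(task),
--         _title_label(task.get("latest_run_status") or "running"),
--         _actor(task),
--         _text_label(task.get("run_elapsed_label")),
--     ])
--
--
-- def _fmt_result(task: dict) -> str: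
--     return _join([
--         _task_id(task),
--         f"result {_title_label(task.get('latest_result_status') or 'recorded').lower()}",
--         _actor(task),
--     ])
--
--
-- def _fmt_completed(task: dict) -> str:
--     return _join([_task_id(task), "completed", _actor(task)])
--
--
-- def _fmt_claimed(task: dict) -> str:
--     return _join([_task_id(task), "claimed", _actor(task)])
--
--
-- _FORMATTERS = {
--     "latest_run_at": _fmt_run,
--     "latest_result_at": _fmt_result,
--     "completed_at": _fmt_completed,
--     "claimed_at": _fmt_claimed,
-- }
--
--
-- def _latest_run_summary(tasks: list[dict[str, Any]]) -> str:
--     values = [hit[1] for hit in map(_first_hit, tasks) if hit]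
--     if not values:
--         return "No recorded work yet"
--     peak = max(values)
--     for task in tasks:
--         hit = _first_hit(task)
--         if hit and hit[1] == peak:
--             return _FORMATTERS[hit[0]](task)
-- ===== Notes on version B (the rewrite author's own statement) =====
-- stated objective: alternative
-- what changed: Replaced A's single stateful scan (latest_task/latest_field/latest_value running-max accumulator with an inner break-loop) by two staged passes: pass 1 computes only the peak timestamp string with a plain max over each task's first non-empty field value, pass 2 searches for the first task bearing that peak; formatting moves from an if-chain to a dispatch dict of per-source formatter functions.
import Mathlib
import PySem

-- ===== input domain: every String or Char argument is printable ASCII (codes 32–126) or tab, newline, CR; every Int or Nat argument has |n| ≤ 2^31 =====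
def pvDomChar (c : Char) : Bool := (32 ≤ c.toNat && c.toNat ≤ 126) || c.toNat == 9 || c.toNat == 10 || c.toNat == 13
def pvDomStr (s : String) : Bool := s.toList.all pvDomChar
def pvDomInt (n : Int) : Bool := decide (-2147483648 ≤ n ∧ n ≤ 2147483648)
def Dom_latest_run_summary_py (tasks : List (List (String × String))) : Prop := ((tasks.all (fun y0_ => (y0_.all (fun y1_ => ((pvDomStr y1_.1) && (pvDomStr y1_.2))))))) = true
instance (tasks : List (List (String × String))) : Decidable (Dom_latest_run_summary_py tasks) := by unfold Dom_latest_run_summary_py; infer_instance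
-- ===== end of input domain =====

-- B replaces A's single running-max scan by two staged passes (max of the first-hit values,
-- then first bearer of that peak) and an if-chain by a dispatch table; same cost, alternative
-- decomposition.


-- ===== shared helpers (identical helper code in both Python sources) =====

-- _text_label(task.get(field)) with string values: strip(getD field "") — str(None or "") = "",
-- (v or "") = v up to the strip; returns "" where Python returns None.
def textLabel (task : List (String × String)) (field : String) : String :=
  PySem.Str.strip (PySem.Dict.getD ⟨task⟩ field "")

-- str.title(): hand port (PySem has no title); exact on ASCII (Dom), where 'cased' = isalpha.
def titleChars : Bool → List Char → List Char
  | _, [] => []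
  | prevCased, c :: cs =>
      if PySem.Chars.isalpha c then
        (if prevCased then PySem.Chars.lowerChar c else PySem.Chars.upperChar c) :: titleChars true cs
      else
        c :: titleChars false cs

def titleLabel (value : String) : String :=
  let text := PySem.Str.strip value
  if text = "" then ""
  else String.ofList (titleChars false (PySem.Str.replace (PySem.Str.replace text "-" " ") "_" " ").toList)

-- " · ".join(part for part in parts if part)
def joinParts (parts : List String) : String :=
  PySem.Str.join " · " (parts.filter (fun p => p ≠ ""))

-- task.get(k) or default  (None / "" both fall back)
def getOr (task : List (String × String)) (k d : String) : String :=
  let raw := PySem.Dict.getD ⟨task⟩ k ""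
  if raw = "" then d else raw

def pyFields : List String := ["latest_run_at", "latest_result_at", "completed_at", "claimed_at"]

-- ===== PORT A =====

-- inner 'for field in fields' loop of _latest_task_with_timestamp (continue on empty, break after
-- the first non-empty field); acc = ((latest_task, latest_field)?, latest_value)
def latestInner (task : List (String × String))
    (acc : Option (List (String × String) × String) × String) :
    List String → Option (List (String × String) × String) × String
  | [] => acc
  | f :: rest =>
      let v := textLabel task f
      if v = "" then latestInner task acc rest
      else if acc.2 < v then (some (task, f), v) else acc

def latest_run_summary_py (tasks : List (List (String × String))) : String :=
  match tasks.foldl (fun acc t => latestInner t acc pyFields) (none, "") with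
  | (none, _) => "No recorded work yet"
  | (some (t, source), _) =>
      let task_id := let s := textLabel t "id"; if s = "" then "Unknown task" else s
      let actor := let a := textLabel t "child_agent"; if a = "" then textLabel t "claimed_by" else a
      let elapsed := textLabel t "run_elapsed_label"
      if source = "latest_run_at" then
        joinParts [task_id, titleLabel (getOr t "latest_run_status" "running"), actor, elapsed]
      else if source = "latest_result_at" then
        joinParts [task_id, "result " ++ PySem.Str.lower (titleLabel (getOr t "latest_result_status" "recorded")), actor]
      else if source = "completed_at" then
        joinParts [task_id, "completed", actor]
      else
        joinParts [task_id, "claimed", actor]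

-- ===== PORT B =====

-- _first_hit: the for-loop over _FIELDS returning the first (field, value) with a non-empty value
def firstHit : List (String × String) → List String → Option (String × String)
  | _, [] => none
  | task, f :: rest =>
      let v := textLabel task f
      if v = "" then firstHit task rest else some (f, v)

def taskIdB (task : List (String × String)) : String :=
  let s := textLabel task "id"; if s = "" then "Unknown task" else s

def actorB (task : List (String × String)) : String :=
  let a := textLabel task "child_agent"; if a = "" then textLabel task "claimed_by" else a

def fmtRun (task : List (String × String)) : String :=
  joinParts [taskIdB task, titleLabel (getOr task "latest_run_status" "running"), actorB task,
             textLabel task "run_elapsed_label"]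

def fmtResult (task : List (String × String)) : String :=
  joinParts [taskIdB task,
             "result " ++ PySem.Str.lower (titleLabel (getOr task "latest_result_status" "recorded")),
             actorB task]

def fmtCompleted (task : List (String × String)) : String :=
  joinParts [taskIdB task, "completed", actorB task]

def fmtClaimed (task : List (String × String)) : String :=
  joinParts [taskIdB task, "claimed", actorB task]

-- _FORMATTERS dispatch dict
def formatters : List (String × (List (String × String) → String)) :=
  [("latest_run_at", fmtRun), ("latest_result_at", fmtResult),
   ("completed_at", fmtCompleted), ("claimed_at", fmtClaimed)]

-- pass 2: 'for task in tasks: hit = _first_hit(task); if hit and hit[1] == peak: return ...'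
-- (falling off the loop is unreachable in B — peak comes from the same hits; ported as "")
def searchPeak (peak : String) : List (List (String × String)) → String
  | [] => ""
  | t :: ts =>
      match firstHit t pyFields with
      | some (f, v) =>
          if v = peak then
            match PySem.Dict.get? ⟨formatters⟩ f with
            | some g => g t
            | none => ""  -- unreachable: f ∈ _FIELDS (KeyError cannot fire)
          else searchPeak peak ts
      | none => searchPeak peak ts

-- values = [hit[1] for hit in map(_first_hit, tasks) if hit]
def valuesOf (tasks : List (List (String × String))) : List String :=
  (tasks.map (fun t => firstHit t pyFields)).filterMap (fun h => h.map (·.2))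

def latest_run_summary_py_alt (tasks : List (List (String × String))) : String :=
  let values := valuesOf tasks
  if values = [] then "No recorded work yet"
  else
    -- peak = max(values); values is non-empty here, so the getD default "" is unreachable
    searchPeak ((PySem.List.max? values (fun v => v)).getD "") tasks

-- ===== PRECONDITION & SPEC =====
def Spec_latest_run_summary_py (tasks : List (List (String × String))) (out : String) : Prop := out = latest_run_summary_py_alt tasks
instance (tasks : List (List (String × String))) (out : String) : Decidable (Spec_latest_run_summary_py tasks out) := by unfold Spec_latest_run_summary_py; infer_instance

-- ===== CLAIM (what is proved, stated in full; the proofs are below) =====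
def Claim_equal_latest_run_summary_py : Prop := ∀ (tasks : List (List (String × String))), Dom_latest_run_summary_py tasks → Spec_latest_run_summary_py tasks (latest_run_summary_py tasks)

-- ===== LEMMAS AND PROOFS =====

-- proof-side selection spec: the first task achieving the maximum first-hit value, as a right fold
def mergeSel (h : Option ((List (String × String)) × String × String))
    (r : Option ((List (String × String)) × String × String)) :
    Option ((List (String × String)) × String × String) :=
  match h, r with
  | none, r => r
  | some c, none => some c
  | some c, some c' => if c.2.2 < c'.2.2 then some c' else some c

def hitOf (t : List (String × String)) : Option ((List (String × String)) × String × String) :=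
  (firstHit t pyFields).map (fun h => (t, h.1, h.2))

def select : List (List (String × String)) → Option ((List (String × String)) × String × String)
  | [] => none
  | t :: ts => mergeSel (hitOf t) (select ts)

-- A's accumulator combined with a selection result
def combA (a : Option (List (String × String) × String) × String)
    (r : Option ((List (String × String)) × String × String)) :
    Option (List (String × String) × String) × String :=
  match r with
  | none => a
  | some c => if a.2 < c.2.2 then (some (c.1, c.2.1), c.2.2) else a

theorem str_empty_lt (v : String) (h : v ≠ "") : ("" : String) < v := by
  cases hv : v.toList with
  | nil =>
      have hve : v = "" := by simpa using congrArg String.ofList hv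
      exact absurd hve h
  | cons c cs =>
      have hv' : v = String.ofList (c :: cs) := by simpa using congrArg String.ofList hv
      rw [hv']
      simp [String.lt_iff_toList_lt]

theorem inner_eq (t : List (String × String))
    (acc : Option (List (String × String) × String) × String) (fs : List String) :
    latestInner t acc fs =
      match firstHit t fs with
      | none => acc
      | some fv => if acc.2 < fv.2 then (some (t, fv.1), fv.2) else acc := by
  induction fs with
  | nil => rfl
  | cons f rest ih =>
      by_cases hv : textLabel t f = ""
      · simp [latestInner, firstHit, hv, ih]
      · simp [latestInner, firstHit, hv]

theorem foldA_eq_comb (tasks : List (List (String × String)))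
    (a : Option (List (String × String) × String) × String) :
    tasks.foldl (fun acc t => latestInner t acc pyFields) a = combA a (select tasks) := by
  induction tasks generalizing a with
  | nil => rfl
  | cons t ts ih =>
      simp only [List.foldl_cons, ih, select]
      rw [inner_eq]
      cases hh : firstHit t pyFields with
      | none => simp [hitOf, hh, mergeSel]
      | some fv =>
          obtain ⟨f, v⟩ := fv
          simp only [hitOf, hh, Option.map_some]
          cases hs : select ts with
          | none => simp only [mergeSel, combA]
          | some c =>
              by_cases h1 : v < c.2.2
              · by_cases h2 : a.2 < v
                · simp [mergeSel, combA, h1, h2, lt_trans h2 h1]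
                · simp [mergeSel, combA, h1, h2]
              · by_cases h2 : a.2 < v
                · simp [mergeSel, combA, h1, h2]
                · simp [mergeSel, combA, h1, h2,
                    not_lt.2 (le_trans (not_lt.1 h1) (not_lt.1 h2))]

theorem hit_value_ne (t : List (String × String)) (fs : List String) (f v : String)
    (h : firstHit t fs = some (f, v)) : v ≠ "" ∧ f ∈ fs := by
  induction fs with
  | nil => simp [firstHit] at h
  | cons g rest ih =>
      by_cases hz : textLabel t g = ""
      · simp only [firstHit, hz, if_pos] at h
        obtain ⟨h1, h2⟩ := ih h
        exact ⟨h1, List.mem_cons_of_mem _ h2⟩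
      · simp [firstHit, hz] at h
        obtain ⟨rfl, rfl⟩ := h
        exact ⟨hz, List.mem_cons_self ..⟩

theorem values_ne (ts : List (List (String × String))) (x : String)
    (hx : x ∈ valuesOf ts) : x ≠ "" := by
  simp only [valuesOf, List.mem_filterMap, List.mem_map] at hx
  obtain ⟨o, ⟨t, _, rfl⟩, hval⟩ := hx
  cases hfv : firstHit t pyFields with
  | none => rw [hfv] at hval; simp at hval
  | some fv =>
      obtain ⟨f, v⟩ := fv
      rw [hfv] at hval
      simp only [Option.map_some, Option.some.injEq] at hval
      subst hval
      exact (hit_value_ne t pyFields f v hfv).1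

theorem select_none_iff (tasks : List (List (String × String))) :
    select tasks = none ↔ valuesOf tasks = [] := by
  induction tasks with
  | nil => simp [select, valuesOf]
  | cons t ts ih =>
      simp only [select, valuesOf, List.map_cons, List.filterMap_cons]
      cases hh : firstHit t pyFields with
      | none => simpa [hitOf, hh, mergeSel, valuesOf] using ih
      | some fv =>
          simp only [hitOf, hh, Option.map_some, mergeSel]
          constructor
          · intro h
            exfalso
            cases hsel : select ts with
            | none => rw [hsel] at h; simp at h
            | some c' =>
                rw [hsel] at h
                simp only [mergeSel] at h
                split at h <;> simp at h
          · intro h; simp at h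

theorem select_sound (ts : List (List (String × String)))
    (c : (List (String × String)) × String × String) (hs : select ts = some c) :
    c.2.2 ≠ "" ∧ c.2.1 ∈ pyFields := by
  induction ts with
  | nil => simp [select] at hs
  | cons t rest ih =>
      simp only [select, hitOf] at hs
      cases hfh : firstHit t pyFields with
      | none =>
          rw [hfh] at hs
          simp only [Option.map_none, mergeSel] at hs
          exact ih hs
      | some fv =>
          obtain ⟨f, v⟩ := fv
          rw [hfh] at hs
          simp only [Option.map_some] at hs
          have hfv' := hit_value_ne t pyFields f v hfh
          cases hsel : select rest with
          | none =>
              rw [hsel] at hs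
              simp only [mergeSel] at hs
              injection hs with h
              subst h
              exact ⟨hfv'.1, hfv'.2⟩
          | some c' =>
              rw [hsel] at hs
              simp only [mergeSel] at hs
              split at hs
              · injection hs with h
                subst h
                exact ih hsel
              · injection hs with h
                subst h
                exact ⟨hfv'.1, hfv'.2⟩

-- the running-max fold over the values computes the merged selection value
theorem foldl_max_select (ts : List (List (String × String))) (m : String) :
    (valuesOf ts).foldl max m =
      match select ts with
      | none => m
      | some c => max m c.2.2 := by
  induction ts generalizing m with
  | nil => rfl
  | cons t ts ih =>
      simp only [valuesOf, select, List.map_cons, List.filterMap_cons]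
      cases hh : firstHit t pyFields with
      | none =>
          simp only [hitOf, hh, Option.map_none, mergeSel]
          exact ih m
      | some fv =>
          simp only [hitOf, hh, Option.map_some, List.foldl_cons]
          have := ih (max m fv.2)
          rw [show ((ts.map fun t => firstHit t pyFields).filterMap fun h => h.map (·.2)) = valuesOf ts from rfl, this]
          cases hs : select ts with
          | none => simp [mergeSel]
          | some c =>
              simp only [mergeSel]
              by_cases h1 : fv.2 < c.2.2
              · rw [if_pos h1]
                simp only
                rw [max_assoc]
                congr 1
                exact max_eq_right h1.le
              · rw [if_neg h1]
                simp only
                rw [max_assoc]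
                congr 1
                exact max_eq_left (le_of_not_gt h1)

-- pass 2 finds exactly the selected task
theorem search_select (ts : List (List (String × String)))
    (t₀ : List (String × String)) (f₀ v₀ : String)
    (hs : select ts = some (t₀, f₀, v₀)) :
    searchPeak v₀ ts =
      (match PySem.Dict.get? ⟨formatters⟩ f₀ with | some g => g t₀ | none => "") := by
  induction ts with
  | nil => simp [select] at hs
  | cons t rest ih =>
      simp only [select, hitOf] at hs
      cases hfh : firstHit t pyFields with
      | none =>
          rw [hfh] at hs
          simp only [Option.map_none, mergeSel] at hs
          simp only [searchPeak, hfh]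
          exact ih hs
      | some fv =>
          obtain ⟨f, v⟩ := fv
          rw [hfh] at hs
          simp only [Option.map_some] at hs
          simp only [searchPeak, hfh]
          cases hsel : select rest with
          | none =>
              rw [hsel] at hs
              simp only [mergeSel] at hs
              injection hs with h
              simp only [Prod.mk.injEq] at h
              obtain ⟨rfl, rfl, rfl⟩ := h
              rw [if_pos rfl]
          | some c' =>
              rw [hsel] at hs
              simp only [mergeSel] at hs
              by_cases hlt : v < c'.2.2
              · rw [if_pos hlt] at hs
                injection hs with h
                subst h
                rw [if_neg (ne_of_lt hlt)]
                exact ih hsel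
              · rw [if_neg hlt] at hs
                injection hs with h
                simp only [Prod.mk.injEq] at h
                obtain ⟨rfl, rfl, rfl⟩ := h
                rw [if_pos rfl]

-- ===== VERDICT (by name: the statement is the Claim_ definition above) =====
theorem latest_run_summary_py_spec : Claim_equal_latest_run_summary_py := by
  intro tasks _
  unfold Spec_latest_run_summary_py
  simp only [latest_run_summary_py, latest_run_summary_py_alt, foldA_eq_comb]
  cases hs : select tasks with
  | none =>
      have hv : valuesOf tasks = [] := (select_none_iff tasks).1 hs
      rw [hv]
      rfl
  | some c =>
      have hsound := select_sound tasks c hs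
      obtain ⟨t, f, v⟩ := c
      have hne : v ≠ "" := hsound.1
      have hmem' : f ∈ pyFields := hsound.2
      have hemp : ("" : String) < v := str_empty_lt v hne
      have hvne : valuesOf tasks ≠ [] := by
        intro h
        have h2 := (select_none_iff tasks).2 h
        rw [h2] at hs
        simp at hs
      obtain ⟨x, xs, hv⟩ := List.exists_cons_of_ne_nil hvne
      have hx : x ≠ "" := values_ne tasks x (by simp [hv])
      have hfold : (valuesOf tasks).foldl max "" = v := by
        rw [foldl_max_select tasks "", hs]
        show max "" v = v
        exact max_eq_right hemp.le
      have hpeak : xs.foldl max x = v := by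
        have h2 : (valuesOf tasks).foldl max "" = xs.foldl max x := by
          rw [hv, List.foldl_cons, max_eq_right (str_empty_lt x hx).le]
        rw [← h2]
        exact hfold
      have hcomb : combA (none, "") (some (t, f, v)) = (some (t, f), v) := by
        simp [combA, hemp]
      rw [hv, if_neg (List.cons_ne_nil x xs), PySem.List.max?_id_cons, Option.getD_some,
        hpeak, search_select tasks t f v hs, hcomb]
      simp only [pyFields, List.mem_cons, List.not_mem_nil, or_false] at hmem'
      rcases hmem' with rfl | rfl | rfl | rfl <;> rfl
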